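-- pv_equiv track=rewrite | github.com/koenabanerjee/GenAI---Virtual-pod | src/virtual_dev_pod/agents/product_manager.py | _split_stage_status
-- ===== SOURCE A (Python) =====
-- def _split_stage_status(
--     stage_status: dict[str, str]
-- ) -> tuple[list[str], list[str], list[str]]:
--     completed = [stage for stage, status in stage_status.items() if status == "completed"]
--     in_progress = [
--         stage for stage, status in stage_status.items() if status == "in_progress"
--     ]
--     pending = [stage for stage, status in stage_status.items() if status == "pending"]
--     return completed, in_progress, pending
-- ===== SOURCE B (Python) =====
-- def _split_stage_status(
--     stage_status: dict[str, str]
-- ) -> tuple[list[str], list[str], list[str]]: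
--     completed, in_progress, pending = [], [], []
--     for stage, status in stage_status.items():
--         if status == "completed":
--             completed.append(stage)
--         elif status == "in_progress":
--             in_progress.append(stage)
--         elif status == "pending":
--             pending.append(stage)
--     return completed, in_progress, pending
-- ===== Notes on version B (the rewrite author's own statement) =====
-- stated objective: simpler
-- what changed: Replaced A's three separate filtering comprehensions over the items with one single-pass loop that dispatches each entry to its list via if/elif.
import Mathlib
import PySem

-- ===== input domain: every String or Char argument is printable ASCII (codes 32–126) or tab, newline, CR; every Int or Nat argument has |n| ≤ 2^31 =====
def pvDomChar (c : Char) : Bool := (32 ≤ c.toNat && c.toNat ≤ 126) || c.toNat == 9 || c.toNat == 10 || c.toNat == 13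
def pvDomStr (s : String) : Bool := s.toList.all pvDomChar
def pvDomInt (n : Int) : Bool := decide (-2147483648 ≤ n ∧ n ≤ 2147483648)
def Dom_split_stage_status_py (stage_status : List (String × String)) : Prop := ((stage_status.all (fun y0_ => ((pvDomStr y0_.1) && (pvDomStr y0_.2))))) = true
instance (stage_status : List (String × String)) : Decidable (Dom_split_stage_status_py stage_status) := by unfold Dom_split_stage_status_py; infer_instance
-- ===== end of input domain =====

-- B replaces A's three filtering comprehensions by one single-pass if/elif loop (objective: simpler, one traversal).

-- ===== PORT A =====
-- A: three list comprehensions, each a separate scan filtering by one status.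
def split_stage_status_py (stage_status : List (String × String)) : List String × List String × List String :=
  let completed := (stage_status.filter (fun p => p.2 == "completed")).map (fun p => p.1)
  let in_progress := (stage_status.filter (fun p => p.2 == "in_progress")).map (fun p => p.1)
  let pending := (stage_status.filter (fun p => p.2 == "pending")).map (fun p => p.1)
  (completed, in_progress, pending)

-- ===== PORT B =====
-- B: one fold over the items, appending each stage to the list chosen by if/elif.
def split_stage_status_py_alt (stage_status : List (String × String)) : List String × List String × List String :=
  stage_status.foldl
    (fun (acc : List String × List String × List String) p =>
      if p.2 == "completed" then (acc.1 ++ [p.1], acc.2.1, acc.2.2)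
      else if p.2 == "in_progress" then (acc.1, acc.2.1 ++ [p.1], acc.2.2)
      else if p.2 == "pending" then (acc.1, acc.2.1, acc.2.2 ++ [p.1])
      else acc)
    ([], [], [])

-- ===== PRECONDITION & SPEC =====
def Spec_split_stage_status_py (stage_status : List (String × String)) (out : List String × List String × List String) : Prop := out = split_stage_status_py_alt stage_status
instance (stage_status : List (String × String)) (out : List String × List String × List String) : Decidable (Spec_split_stage_status_py stage_status out) := by unfold Spec_split_stage_status_py; infer_instance

-- ===== CLAIM (what is proved, stated in full; the proofs are below) =====
def Claim_equal_split_stage_status_py : Prop := ∀ (stage_status : List (String × String)), Dom_split_stage_status_py stage_status → Spec_split_stage_status_py stage_status (split_stage_status_py stage_status)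

-- ===== LEMMAS AND PROOFS =====

-- The fold with arbitrary accumulators equals the accumulators extended by the three filters.
theorem split_fold_inv (l : List (String × String)) (c i p : List String) :
    l.foldl
      (fun (acc : List String × List String × List String) q =>
        if q.2 == "completed" then (acc.1 ++ [q.1], acc.2.1, acc.2.2)
        else if q.2 == "in_progress" then (acc.1, acc.2.1 ++ [q.1], acc.2.2)
        else if q.2 == "pending" then (acc.1, acc.2.1, acc.2.2 ++ [q.1])
        else acc)
      (c, i, p)
    = (c ++ (l.filter (fun q => q.2 == "completed")).map (fun q => q.1),
       i ++ (l.filter (fun q => q.2 == "in_progress")).map (fun q => q.1),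
       p ++ (l.filter (fun q => q.2 == "pending")).map (fun q => q.1)) := by
  induction l generalizing c i p with
  | nil => simp
  | cons hd tl ih =>
    simp only [beq_iff_eq] at ih
    simp only [List.foldl_cons, List.filter_cons]
    by_cases h1 : hd.2 = "completed"
    · simp [h1, ih]
    · by_cases h2 : hd.2 = "in_progress"
      · simp [h1, h2, ih]
      · by_cases h3 : hd.2 = "pending"
        · simp [h1, h2, h3, ih]
        · simp [h1, h2, h3, ih]

-- ===== VERDICT (by name: the statement is the Claim_ definition above) =====
theorem split_stage_status_py_spec : Claim_equal_split_stage_status_py := by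
  intro l _
  unfold Spec_split_stage_status_py split_stage_status_py split_stage_status_py_alt
  simpa using (split_fold_inv l [] [] []).symm
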